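-- pv_equiv track=rewrite | github.com/mihaicaragheorghe/adventofcode2025 | day06/a.py | solve
-- ===== SOURCE A (Python) =====
-- def solve(problems: list[list[str]]) -> int:
--     total = 0
--     for x in range(0, len(problems[0])):
--         sign = problems[-1][x]
--         res = 1 if sign == "*" else 0
--         for y in range(0, len(problems) - 1):
--             if sign == "+":
--                 res += int(problems[y][x])
--             elif sign == "*":
--                 res *= int(problems[y][x])
--         total += res
--     return total
-- ===== SOURCE B (Python) =====
-- def solve(problems: list[list[str]]) -> int:
--     signs = problems[-1]
--     w = len(problems[0])
--     acc = [1 if signs[x] == "*" else 0 for x in range(w)]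
--     for row in problems[:-1]:
--         acc = [acc[x] + int(row[x]) if signs[x] == "+"
--                else acc[x] * int(row[x]) if signs[x] == "*"
--                else acc[x]
--                for x in range(w)]
--     return sum(acc)
-- ===== Notes on version B (the rewrite author's own statement) =====
-- stated objective: alternative
-- what changed: B traverses the grid row-major: it initialises a per-column accumulator vector from the sign row, rebuilds it once per value row, and sums it at the end, instead of A's column-major outer loop that finishes each column's result with an inner loop over rows.
import Mathlib
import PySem

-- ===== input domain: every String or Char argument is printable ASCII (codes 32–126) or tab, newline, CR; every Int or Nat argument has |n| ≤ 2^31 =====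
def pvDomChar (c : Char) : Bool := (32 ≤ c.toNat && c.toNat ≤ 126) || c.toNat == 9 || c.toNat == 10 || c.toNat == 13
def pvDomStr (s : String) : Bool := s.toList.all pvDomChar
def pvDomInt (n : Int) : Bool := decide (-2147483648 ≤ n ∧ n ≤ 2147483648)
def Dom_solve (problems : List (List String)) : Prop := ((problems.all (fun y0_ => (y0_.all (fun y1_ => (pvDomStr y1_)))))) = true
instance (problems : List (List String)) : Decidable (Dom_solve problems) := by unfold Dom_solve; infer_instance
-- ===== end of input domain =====

-- B replaces A's column-major double loop (one finished result per column) by a ROW-major single pass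
-- that carries a vector of per-column accumulators, rebuilt row by row, summed at the end (objective: alternative).

-- ===== PORT A =====
def solve (problems : List (List String)) : Int :=
  (PySem.List.pyRange 0 ((PySem.List.pyGetD problems 0 []).length : Int) 1).foldl
    (fun total x =>
      let sign := PySem.List.pyGetD (PySem.List.pyGetD problems (-1) []) x ""
      let res0 : Int := if sign = "*" then 1 else 0
      let res := (PySem.List.pyRange 0 ((problems.length : Int) - 1) 1).foldl
        (fun res y =>
          if sign = "+" then
            res + (PySem.Int.ofStr? (PySem.List.pyGetD (PySem.List.pyGetD problems y []) x "")).getD 0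
          else if sign = "*" then
            res * (PySem.Int.ofStr? (PySem.List.pyGetD (PySem.List.pyGetD problems y []) x "")).getD 0
          else res) res0
      total + res) 0

-- ===== PORT B =====
def solve_alt (problems : List (List String)) : Int :=
  let signs := PySem.List.pyGetD problems (-1) []
  let w := (PySem.List.pyGetD problems 0 []).length
  let acc0 := (PySem.List.pyRange 0 (w : Int) 1).map
    (fun x => if PySem.List.pyGetD signs x "" = "*" then (1 : Int) else 0)
  let accF := (PySem.List.slice problems none (some (-1))).foldl
    (fun acc row =>
      (PySem.List.pyRange 0 (w : Int) 1).map (fun x =>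
        if PySem.List.pyGetD signs x "" = "+" then
          PySem.List.pyGetD acc x 0 + (PySem.Int.ofStr? (PySem.List.pyGetD row x "")).getD 0
        else if PySem.List.pyGetD signs x "" = "*" then
          PySem.List.pyGetD acc x 0 * (PySem.Int.ofStr? (PySem.List.pyGetD row x "")).getD 0
        else PySem.List.pyGetD acc x 0)) acc0
  accF.sum

-- ===== PRECONDITION & SPEC =====
-- Pre_solve is exactly the set of inputs where the Python A returns normally: a nonempty grid whose
-- last (sign) row covers every column of row 0, and whose '+'/'*' columns are int-parsable in every
-- value row (elsewhere A raises IndexError / ValueError).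
def Pre_solve (problems : List (List String)) : Prop :=
  problems ≠ [] ∧
  (problems.getD 0 []).length ≤ (problems.getLastD []).length ∧
  ∀ x < (problems.getD 0 []).length,
    ((problems.getLastD []).getD x "" = "+" ∨ (problems.getLastD []).getD x "" = "*") →
      ∀ row ∈ problems.dropLast, x < row.length ∧ PySem.Int.ofStr? (row.getD x "") ≠ none
instance (problems : List (List String)) : Decidable (Pre_solve problems) := by
  unfold Pre_solve; infer_instance

def pvWitness_solve : List (List String) := [["1", "2"], ["3", "4"], ["+", "*"]]

def Spec_solve (problems : List (List String)) (out : Int) : Prop := out = solve_alt problems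
instance (problems : List (List String)) (out : Int) : Decidable (Spec_solve problems out) := by
  unfold Spec_solve; infer_instance

-- ===== CLAIM =====
def Claim_equal_solve : Prop :=
  ∀ (problems : List (List String)), Dom_solve problems → Pre_solve problems →
    Spec_solve problems (solve problems)

-- ===== LEMMAS AND PROOFS =====

-- A's per-column computation (the body of A's outer loop)
def aCol (problems : List (List String)) (x : Int) : Int :=
  let sign := PySem.List.pyGetD (PySem.List.pyGetD problems (-1) []) x ""
  let res0 : Int := if sign = "*" then 1 else 0
  (PySem.List.pyRange 0 ((problems.length : Int) - 1) 1).foldl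
    (fun res y =>
      if sign = "+" then
        res + (PySem.Int.ofStr? (PySem.List.pyGetD (PySem.List.pyGetD problems y []) x "")).getD 0
      else if sign = "*" then
        res * (PySem.Int.ofStr? (PySem.List.pyGetD (PySem.List.pyGetD problems y []) x "")).getD 0
      else res) res0

lemma solve_eq (problems : List (List String)) :
    solve problems
      = ((PySem.List.pyRange 0 ((PySem.List.pyGetD problems 0 []).length : Int) 1).map
          (aCol problems)).sum := by
  have h := PySem.List.foldl_add
    (PySem.List.pyRange 0 ((PySem.List.pyGetD problems 0 []).length : Int) 1)
    (aCol problems) 0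
  rw [zero_add] at h
  exact h

-- replacing 'problems[y]' by 'problems.dropLast[y]' inside A's inner loop
lemma inner_fold (problems : List (List String)) (F : Int → List String → Int) (i : Int) :
    (PySem.List.pyRange 0 ((problems.dropLast.length : Nat) : Int) 1).foldl
      (fun res y => F res (PySem.List.pyGetD problems y [])) i
    = problems.dropLast.foldl F i := by
  calc (PySem.List.pyRange 0 ((problems.dropLast.length : Nat) : Int) 1).foldl
        (fun res y => F res (PySem.List.pyGetD problems y [])) i
      = (PySem.List.pyRange 0 ((problems.dropLast.length : Nat) : Int) 1).foldl
        (fun res y => F res (PySem.List.pyGetD problems.dropLast y [])) i := by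
        apply PySem.List.foldl_congr_mem
        intro acc y hy
        rw [PySem.List.mem_pyRange_one] at hy
        have h1 : y < ((problems.dropLast.length : Nat) : Int) := hy.2
        have h1' : y < ((problems.length : Nat) : Int) := by
          have := List.length_dropLast (xs := problems); omega
        congr 1
        rw [PySem.List.pyGetD_eq_getElem _ _ hy.1 h1', PySem.List.pyGetD_eq_getElem _ _ hy.1 h1,
          List.getElem_dropLast]
    _ = problems.dropLast.foldl F i :=
        PySem.List.foldl_pyRange_zero_pyGetD' problems.dropLast [] F i

-- row-major invariant: folding B's per-row vector update equals, per column, the column-wise fold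
lemma rowfold (rows : List (List String)) (w : Nat)
    (g : Int → Int → List String → Int) (f : Int → Int) :
    rows.foldl
      (fun acc row => (PySem.List.pyRange 0 (w : Int) 1).map
        (fun x => g x (PySem.List.pyGetD acc x 0) row))
      ((PySem.List.pyRange 0 (w : Int) 1).map f)
    = (PySem.List.pyRange 0 (w : Int) 1).map
        (fun x => rows.foldl (fun a row => g x a row) (f x)) := by
  induction rows generalizing f with
  | nil => rfl
  | cons r t ih =>
    rw [List.foldl_cons]
    have hstep : (PySem.List.pyRange 0 (w : Int) 1).map
        (fun x => g x (PySem.List.pyGetD ((PySem.List.pyRange 0 (w : Int) 1).map f) x 0) r)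
      = (PySem.List.pyRange 0 (w : Int) 1).map (fun x => g x (f x) r) := by
      apply List.map_congr_left
      intro x hx
      rw [PySem.List.mem_pyRange_one] at hx
      rw [PySem.List.pyGetD_map_pyRange_of_nonneg f _ _ _ hx.1 hx.2]
    rw [hstep, ih (fun x => g x (f x) r)]
    simp only [List.foldl_cons]

-- A's column result as a fold over the value rows (needs problems ≠ [] for the loop bound)
lemma aCol_eq (problems : List (List String)) (h : problems ≠ []) (x : Int) :
    aCol problems x
      = problems.dropLast.foldl
          (fun a row =>
            if PySem.List.pyGetD (PySem.List.pyGetD problems (-1) []) x "" = "+" then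
              a + (PySem.Int.ofStr? (PySem.List.pyGetD row x "")).getD 0
            else if PySem.List.pyGetD (PySem.List.pyGetD problems (-1) []) x "" = "*" then
              a * (PySem.Int.ofStr? (PySem.List.pyGetD row x "")).getD 0
            else a)
          (if PySem.List.pyGetD (PySem.List.pyGetD problems (-1) []) x "" = "*" then 1 else 0) := by
  unfold aCol
  have hlen : 1 ≤ problems.length := List.length_pos_iff.mpr h
  have hbound : ((problems.length : Int) - 1) = ((problems.dropLast.length : Nat) : Int) := by
    rw [List.length_dropLast]; omega
  simp only [hbound]
  exact inner_fold problems
    (fun a row =>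
      if PySem.List.pyGetD (PySem.List.pyGetD problems (-1) []) x "" = "+" then
        a + (PySem.Int.ofStr? (PySem.List.pyGetD row x "")).getD 0
      else if PySem.List.pyGetD (PySem.List.pyGetD problems (-1) []) x "" = "*" then
        a * (PySem.Int.ofStr? (PySem.List.pyGetD row x "")).getD 0
      else a) _

-- ===== VERDICT (by name: the statement is the Claim_ definition above) =====
theorem solve_spec : Claim_equal_solve := by
  unfold Claim_equal_solve
  intro problems _ hPre
  unfold Spec_solve
  obtain ⟨h, -, -⟩ := hPre
  rw [solve_eq]
  show _ = solve_alt problems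
  simp only [solve_alt, PySem.List.slice_to_neg_one]
  rw [rowfold problems.dropLast (PySem.List.pyGetD problems 0 []).length
    (fun x a row =>
      if PySem.List.pyGetD (PySem.List.pyGetD problems (-1) []) x "" = "+" then
        a + (PySem.Int.ofStr? (PySem.List.pyGetD row x "")).getD 0
      else if PySem.List.pyGetD (PySem.List.pyGetD problems (-1) []) x "" = "*" then
        a * (PySem.Int.ofStr? (PySem.List.pyGetD row x "")).getD 0
      else a)
    (fun x => if PySem.List.pyGetD (PySem.List.pyGetD problems (-1) []) x "" = "*" then 1 else 0)]
  refine congrArg List.sum (List.map_congr_left ?_)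
  intro x _
  exact aCol_eq problems h x
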